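-- pv_equiv track=rewrite | github.com/yekki/leetcode-workbench | problems/n371/solution.py | getSum_1
-- ===== SOURCE A (Python) =====
-- def getSum_1(a: int, b: int) -> int:
--     a &= 0xFFFFFFFF
--     b &= 0xFFFFFFFF
--     while b:
--         carry = a & b
--         a ^= b
--         b = ((carry) << 1) & 0xFFFFFFFF
--
--     return a if a < 0x80000000 else ~(a ^ 0xFFFFFFFF)
-- ===== SOURCE B (Python) =====
-- def getSum_1(a: int, b: int) -> int:
--     s = (a + b) & 0xFFFFFFFF
--     return s if s < 0x80000000 else s - 0x100000000
-- ===== Notes on version B (the rewrite author's own statement) =====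
-- stated objective: simpler
-- what changed: Replaces the bitwise carry-propagation loop with a closed-form computation: mask (a+b) to 32 bits and fold the sign with a subtraction instead of the xor/complement trick.
import Mathlib
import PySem

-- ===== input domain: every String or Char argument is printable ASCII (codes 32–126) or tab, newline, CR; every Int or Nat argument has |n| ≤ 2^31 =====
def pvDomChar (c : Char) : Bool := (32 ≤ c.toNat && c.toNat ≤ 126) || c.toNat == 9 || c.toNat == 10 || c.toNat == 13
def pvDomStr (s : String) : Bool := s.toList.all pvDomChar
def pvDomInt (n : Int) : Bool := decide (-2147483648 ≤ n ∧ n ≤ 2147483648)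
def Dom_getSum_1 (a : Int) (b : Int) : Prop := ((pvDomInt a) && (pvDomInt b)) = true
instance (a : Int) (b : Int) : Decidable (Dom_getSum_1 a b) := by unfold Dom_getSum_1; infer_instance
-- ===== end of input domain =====

-- B replaces the bitwise carry-propagation loop with a closed-form mask of (a+b) and a
-- subtractive sign fold (objective: simpler).


-- ===== PORT A =====
-- Python's while-loop; fuel 33 only makes it total (after each pass the carry has gained a
-- low zero bit, so b = 0 within 33 iterations — proved in pvLoopA_eq below, the fuel branch
-- is never the result).  'x & 0xFFFFFFFF' on a Nat equals x % 2^32: exact.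
def pvLoopA : Nat → Nat → Nat → Nat
  | 0, a, _ => a
  | f + 1, a, b =>
    if b = 0 then a
    else pvLoopA f (a ^^^ b) (((a &&& b) <<< 1) % 4294967296)

def getSum_1 (a : Int) (b : Int) : Int :=
  -- Python 'x & 0xFFFFFFFF' on an int (any sign) equals x mod 2^32 (two's complement): exact
  let a' : Nat := (PySem.Int.mod a 4294967296).toNat
  let b' : Nat := (PySem.Int.mod b 4294967296).toNat
  let r : Nat := pvLoopA 33 a' b'
  -- Python '~x' is -x-1: exact
  if (r : Int) < 2147483648 then (r : Int) else -(((r ^^^ 4294967295 : Nat) : Int)) - 1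

-- ===== PORT B =====
def getSum_1_alt (a : Int) (b : Int) : Int :=
  -- '(a + b) & 0xFFFFFFFF' equals (a + b) mod 2^32: exact
  let s := PySem.Int.mod (a + b) 4294967296
  if s < 2147483648 then s else s - 4294967296

-- ===== PRECONDITION & SPEC =====
def Spec_getSum_1 (a : Int) (b : Int) (out : Int) : Prop := out = getSum_1_alt a b
instance (a : Int) (b : Int) (out : Int) : Decidable (Spec_getSum_1 a b out) := by unfold Spec_getSum_1; infer_instance

-- ===== CLAIM (what is proved, stated in full; the proofs are below) =====
def Claim_equal_getSum_1 : Prop := ∀ (a : Int) (b : Int), Dom_getSum_1 a b → Spec_getSum_1 a b (getSum_1 a b)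

-- ===== LEMMAS AND PROOFS =====

-- Carry-free decomposition of addition: a + b = (a XOR b) + 2·(a AND b).
theorem pv_add_eq_xor_add_two_and (a : Nat) : ∀ b : Nat, a + b = (a ^^^ b) + 2 * (a &&& b) := by
  induction a using Nat.binaryRec with
  | zero => simp
  | bit c a ih =>
    intro b
    induction b using Nat.binaryRec with
    | zero => simp
    | bit d b _ =>
      have hx := Nat.xor_bit c a d b
      have ha := Nat.land_bit c a d b
      have hab := ih b
      cases c <;> cases d <;> simp [Nat.bit] at hx ha ⊢ <;> omega

-- If 2^k divides b it divides a &&& b.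
theorem pv_two_pow_dvd_and (k a b : Nat) (h : 2 ^ k ∣ b) : 2 ^ k ∣ a &&& b := by
  have hb : b % 2 ^ k = 0 := Nat.dvd_iff_mod_eq_zero.mp h
  have : (a &&& b) % 2 ^ k = 0 := by
    rw [← Nat.and_two_pow_sub_one_eq_mod, Nat.and_assoc, Nat.and_two_pow_sub_one_eq_mod, hb, Nat.and_zero]
  exact Nat.dvd_of_mod_eq_zero this

-- The masked carry loop computes (a + b) mod 2^32.
theorem pvLoopA_eq : ∀ (f a b : Nat), a < 4294967296 → b < 4294967296 →
    2 ^ (33 - f) ∣ b → pvLoopA f a b = (a + b) % 4294967296 := by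
  intro f
  induction f with
  | zero =>
    intro a b ha hb hd
    have hd' : (8589934592 : Nat) ∣ b := by norm_num at hd; exact hd
    have : b = 0 := Nat.eq_zero_of_dvd_of_lt hd' (by omega)
    subst this
    simp [pvLoopA, Nat.mod_eq_of_lt ha]
  | succ f ih =>
    intro a b ha hb hd
    by_cases hb0 : b = 0
    · subst hb0; simp [pvLoopA, Nat.mod_eq_of_lt ha]
    · rw [pvLoopA, if_neg hb0]
      have hx : a ^^^ b < 4294967296 := Nat.xor_lt_two_pow (n := 32) (by exact_mod_cast ha) (by exact_mod_cast hb)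
      have hc : ((a &&& b) <<< 1) % 4294967296 < 4294967296 := Nat.mod_lt _ (by norm_num)
      have hdvd : 2 ^ (33 - f) ∣ ((a &&& b) <<< 1) % 4294967296 := by
        rcases Nat.lt_or_ge f 33 with hf | hf
        swap
        · simp [Nat.sub_eq_zero_of_le hf]
        · -- 33 - (f+1) = 32 - f and 33 - f = (32 - f) + 1
          have hk : 2 ^ (32 - f) ∣ a &&& b := by
            apply pv_two_pow_dvd_and
            have : 33 - (f + 1) = 32 - f := by omega
            rwa [this] at hd
          have h2 : 2 ^ (33 - f) ∣ (a &&& b) <<< 1 := by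
            have : 33 - f = (32 - f) + 1 := by omega
            rw [this, Nat.shiftLeft_eq, pow_succ, Nat.pow_succ]
            exact Nat.mul_dvd_mul hk (dvd_refl 2)
          rcases Nat.lt_or_ge f 1 with h1 | h1
          swap
          · -- 33 - f ≤ 32, so 2^(33-f) also divides 2^32, hence the remainder
            have h32 : 2 ^ (33 - f) ∣ (4294967296 : Nat) := by
              have : (4294967296 : Nat) = 2 ^ 32 := by norm_num
              rw [this]
              exact Nat.pow_dvd_pow 2 (by omega)
            exact (Nat.dvd_mod_iff h32).mpr h2
          · -- f = 0: the shifted carry is < 2^33 and divisible by 2^33, hence 0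
            interval_cases f
            have hlt : (a &&& b) <<< 1 < 2 ^ 33 := by
              have := Nat.and_le_right (n := a) (m := b)
              rw [Nat.shiftLeft_eq]
              norm_num
              omega
            have : (a &&& b) <<< 1 = 0 := Nat.eq_zero_of_dvd_of_lt h2 (by norm_num at hlt ⊢; omega)
            simp [this]
      rw [ih _ _ hx hc hdvd]
      -- value invariant: (a^^^b) + 2*(a&&&b) = a + b, and masking the carry keeps it mod 2^32
      have hval := pv_add_eq_xor_add_two_and a b
      conv_rhs => rw [hval]
      rw [Nat.shiftLeft_eq]
      omega

-- XOR with the all-ones 32-bit mask is complement within 2^32.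
theorem pv_xor_ones (n : Nat) (h : n < 4294967296) : n ^^^ 4294967295 = 4294967295 - n := by
  have h1 := pv_add_eq_xor_add_two_and n 4294967295
  have h2 : n &&& 4294967295 = n := by
    have : (4294967295 : Nat) = 2 ^ 32 - 1 := by norm_num
    rw [this, Nat.and_two_pow_sub_one_eq_mod, Nat.mod_eq_of_lt (by norm_num; omega)]
  omega

-- ===== VERDICT (by name: the statement is the Claim_ definition above) =====
theorem getSum_1_spec : Claim_equal_getSum_1 := by
  intro a b _
  unfold Spec_getSum_1 getSum_1 getSum_1_alt
  have hmodA := PySem.Int.mod_eq_emod_of_pos (a := a) (b := 4294967296) (by norm_num)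
  have hmodB := PySem.Int.mod_eq_emod_of_pos (a := b) (b := 4294967296) (by norm_num)
  have hmodS := PySem.Int.mod_eq_emod_of_pos (a := a + b) (b := 4294967296) (by norm_num)
  simp only [hmodA, hmodB, hmodS]
  set na : Nat := (a % 4294967296).toNat with hna
  set nb : Nat := (b % 4294967296).toNat with hnb
  have hnaB : na < 4294967296 := by
    have := Int.emod_lt_of_pos a (b := 4294967296) (by norm_num)
    have := Int.emod_nonneg a (b := (4294967296 : Int)) (by norm_num)
    omega
  have hnbB : nb < 4294967296 := by
    have := Int.emod_lt_of_pos b (b := 4294967296) (by norm_num)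
    have := Int.emod_nonneg b (b := (4294967296 : Int)) (by norm_num)
    omega
  rw [pvLoopA_eq 33 na nb hnaB hnbB (by norm_num)]
  set r : Nat := (na + nb) % 4294967296 with hr
  have hrB : r < 4294967296 := Nat.mod_lt _ (by norm_num)
  have hs : (a + b) % (4294967296 : Int) = (r : Int) := by
    have ha' : (na : Int) = a % 4294967296 := by
      rw [hna]; exact Int.toNat_of_nonneg (Int.emod_nonneg a (by norm_num))
    have hb' : (nb : Int) = b % 4294967296 := by
      rw [hnb]; exact Int.toNat_of_nonneg (Int.emod_nonneg b (by norm_num))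
    have hr' : (r : Int) = ((na : Int) + (nb : Int)) % 4294967296 := by
      rw [hr, Int.natCast_mod]; push_cast; rfl
    rw [hr', ha', hb']
    omega
  rw [hs]
  by_cases hlt : (r : Int) < 2147483648
  · rw [if_pos hlt, if_pos hlt]
  · rw [if_neg hlt, if_neg hlt, pv_xor_ones r hrB]
    have : r ≤ 4294967295 := by omega
    push_cast [Nat.cast_sub this]
    omega
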